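-- pv_equiv track=rewrite | github.com/xbaysal11/Python | Encryption/erician.py | x_ian
-- ===== SOURCE A (Python) =====
-- def x_ian(x, word):
--     """
--     Given a string x, returns True if all the letters in x are
--     contained in word in the same order as they appear in x.
--
--     >>> x_ian('eric', 'meritocracy')
--     True
--     >>> x_ian('eric', 'cerium')
--     False
--     >>> x_ian('john', 'mahjong')
--     False
--
--     x: a string
--     word: a string
--     returns: True if word is x_ian, False otherwise
--     """
--     if x == "":
--         return True
--     elif word == "" and x != "":
--         return False
--     elif x[0] in word:
--         return True and x_ian(x[1:], word[word.find(x[0]):])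
--     else:
--         return False
-- ===== SOURCE B (Python) =====
-- def x_ian(x, word):
--     # One left-to-right pass over word with a pointer j into x: at each word
--     # character, consume the maximal run of matching chars of x.  Note A does
--     # NOT advance past a matched character (word[word.find(c):] keeps it), so
--     # equal consecutive chars of x may map to the same position of word.
--     j = 0
--     n = len(x)
--     for w in word:
--         while j < n and x[j] == w:
--             j += 1
--     return j == n
-- ===== Notes on version B (the rewrite author's own statement) =====
-- stated objective: faster
-- what changed: Replaces A's recursion with repeated substring search and string slicing by a single left-to-right pass over word that advances a pointer into x (greedy earliest-match), so no find() scans or slice copies.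
import Mathlib
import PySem

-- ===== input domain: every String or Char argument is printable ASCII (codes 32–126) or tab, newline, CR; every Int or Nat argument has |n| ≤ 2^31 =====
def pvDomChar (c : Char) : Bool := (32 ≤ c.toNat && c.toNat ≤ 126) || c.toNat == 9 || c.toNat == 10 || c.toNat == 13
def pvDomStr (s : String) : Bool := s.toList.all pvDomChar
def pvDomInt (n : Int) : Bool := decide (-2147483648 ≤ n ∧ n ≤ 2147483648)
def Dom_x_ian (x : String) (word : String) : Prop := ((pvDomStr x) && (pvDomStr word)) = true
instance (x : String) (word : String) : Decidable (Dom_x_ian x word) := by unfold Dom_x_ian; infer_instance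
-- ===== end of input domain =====

-- B replaces A's recursion (substring search + slicing per char of x) by one
-- left-to-right pass over word with a pointer into x; measured faster (asymptotic).


-- ===== PORT A =====
-- Recursion on x (x[1:] each step).  'x[0] in word' → Chars.isIn [c] w;
-- 'word.find(x[0])' → Chars.find w [c]; under the membership guard find ≥ 0,
-- so the slice word[i:] is exactly List.drop i (exact here).
def x_ian_go : List Char → List Char → Bool
  | [], _ => true
  | c :: cs, w =>
    if w = [] then false
    else if PySem.Chars.isIn [c] w then
      x_ian_go cs (w.drop (PySem.Chars.find w [c]).toNat)
    else false

def x_ian (x : String) (word : String) : Bool :=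
  x_ian_go x.toList word.toList

-- ===== PORT B =====
-- Source B's pointer j into x is represented as the remaining suffix x[j:];
-- the inner 'while j < n and x[j] == w: j += 1' is dropWhile (· == w).
def x_ian_alt (x : String) (word : String) : Bool :=
  (word.toList.foldl (fun rem w => rem.dropWhile (fun ch => ch == w)) x.toList).isEmpty

-- ===== PRECONDITION & SPEC =====
def Spec_x_ian (x : String) (word : String) (out : Bool) : Prop := out = x_ian_alt x word
instance (x : String) (word : String) (out : Bool) : Decidable (Spec_x_ian x word out) := by unfold Spec_x_ian; infer_instance

-- ===== CLAIM (what is proved, stated in full; the proofs are below) =====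
def Claim_equal_x_ian : Prop := ∀ (x : String) (word : String), Dom_x_ian x word → Spec_x_ian x word (x_ian x word)

-- ===== LEMMAS AND PROOFS =====

-- Folding B's step over any word leaves the empty remainder empty.
theorem pv_fold_nil (w : List Char) :
    w.foldl (fun rem c => rem.dropWhile (fun ch => ch == c)) ([] : List Char) = [] := by
  induction w with
  | nil => rfl
  | cons a w ih => simpa using ih

-- If the head c of the remainder occurs nowhere in w, the fold is the identity.
theorem pv_fold_not_mem (w : List Char) (c : Char) (cs : List Char) (h : c ∉ w) :
    w.foldl (fun rem c' => rem.dropWhile (fun ch => ch == c')) (c :: cs) = c :: cs := by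
  induction w with
  | nil => rfl
  | cons a w ih =>
    have hca : (c == a) = false := by
      simp only [beq_eq_false_iff_ne]; exact fun hc => h (hc ▸ List.mem_cons_self)
    simp only [List.foldl_cons, List.dropWhile_cons, hca, Bool.false_eq_true, if_false]
    exact ih (fun hm => h (List.mem_cons_of_mem a hm))

-- Decomposing w = u ++ c :: t with c ∉ u: the fold first skips u, then the
-- step at c drops the leading run of c's, then the fold continues over t.
theorem pv_fold_split (u t : List Char) (c : Char) (cs : List Char) (h : c ∉ u) :
    (u ++ c :: t).foldl (fun rem c' => rem.dropWhile (fun ch => ch == c')) (c :: cs)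
      = t.foldl (fun rem c' => rem.dropWhile (fun ch => ch == c')) (cs.dropWhile (fun ch => ch == c)) := by
  induction u with
  | nil => simp
  | cons a u ih =>
    have hca : (c == a) = false := by
      simp only [beq_eq_false_iff_ne]; exact fun hc => h (hc ▸ List.mem_cons_self)
    simp only [List.cons_append, List.foldl_cons, List.dropWhile_cons, hca,
      Bool.false_eq_true, if_false]
    exact ih (fun hm => h (List.mem_cons_of_mem a hm))

-- Single-character infix is membership.
-- Single-character infix is membership.
theorem pv_infix_singleton (c : Char) (w : List Char) : [c] <:+: w ↔ c ∈ w := by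
  constructor
  · rintro ⟨s, t, rfl⟩; simp
  · intro hm
    obtain ⟨s, t, rfl⟩ := List.append_of_mem hm
    exact ⟨s, t, by simp⟩

-- Main loop lemma: A's recursion computes B's fold.
theorem pv_go_eq (xs : List Char) : ∀ w : List Char,
    x_ian_go xs w = (w.foldl (fun rem c' => rem.dropWhile (fun ch => ch == c')) xs).isEmpty := by
  induction xs with
  | nil => intro w; simp [x_ian_go, pv_fold_nil]
  | cons c cs ih =>
    intro w
    by_cases hw : w = []
    · subst hw; simp [x_ian_go]
    · by_cases hin : PySem.Chars.isIn [c] w = true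
      · -- c occurs in w; k = find w [c] points at its first occurrence
        have hnn : 0 ≤ PySem.Chars.find w [c] :=
          (PySem.Chars.find_nonneg_iff w [c]).2 ((PySem.Chars.isIn_iff_infix [c] w).1 hin)
        obtain ⟨hpre, hmin⟩ := PySem.Chars.find_spec (s := w) (sub := [c]) hnn
        set k := (PySem.Chars.find w [c]).toNat with hk
        obtain ⟨t, ht⟩ := hpre
        have hdrop : w.drop k = c :: t := ht.symm
        have hwdecomp : w = w.take k ++ c :: t := by
          rw [← hdrop, List.take_append_drop]
        -- c does not occur in w.take k (minimality of find)
        have hnotmem : c ∉ w.take k := by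
          intro hm
          obtain ⟨i, hi, hgi⟩ := List.getElem_of_mem hm
          have hi' : i < k ∧ i < w.length := by simpa using hi
          have hg : w[i]'hi'.2 = c := by simpa using hgi
          apply hmin i hi'.1
          refine ⟨w.drop (i + 1), ?_⟩
          rw [List.singleton_append, ← hg]
          exact (List.drop_eq_getElem_cons hi'.2).symm
        simp only [x_ian_go, hw, if_false, hin, if_true]
        rw [ih (w.drop k), hdrop]
        conv_rhs => rw [hwdecomp]
        rw [pv_fold_split _ _ _ _ hnotmem]
        simp
      · -- c not in w: A returns false, and the fold never touches the head c
        have hmem : c ∉ w := by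
          intro hm
          exact ((PySem.Chars.isIn_eq_false_iff [c] w).1 (by simpa using hin))
            ((pv_infix_singleton c w).2 hm)
        simp [x_ian_go, hw, hin, pv_fold_not_mem w c cs hmem]

-- ===== VERDICT (by name: the statement is the Claim_ definition above) =====
theorem x_ian_spec : Claim_equal_x_ian := by
  intro x word _
  unfold Spec_x_ian x_ian x_ian_alt
  exact pv_go_eq x.toList word.toList
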